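-- pv_equiv track=rewrite | github.com/coseeing/DotExpress | document_workspace.py | choose_selection_after_delete
-- ===== SOURCE A (Python) =====
-- def choose_selection_after_delete(names: list[str], deleted_name: str) -> str | None:
--     if deleted_name not in names:
--         return names[0] if names else None
--     index = names.index(deleted_name)
--     remaining = [name for name in names if name != deleted_name]
--     if not remaining:
--         return None
--     if index > 0:
--         return remaining[index - 1]
--     return remaining[0]
-- ===== SOURCE B (Python) =====
-- def choose_selection_after_delete(names: list[str], deleted_name: str) -> str | None:
--     # Single pass with an accumulator: no membership test, no .index, no filtered list.
--     seen = False      # a deleted occurrence has been passed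
--     prev = None       # last surviving name seen before the first occurrence
--     survivor = None   # first surviving name anywhere
--     for name in names:
--         if name == deleted_name:
--             seen = True
--         else:
--             if survivor is None:
--                 survivor = name
--             if not seen:
--                 prev = name
--     if seen and prev is not None:
--         return prev
--     return survivor
-- ===== Notes on version B (the rewrite author's own statement) =====
-- stated objective: alternative
-- what changed: B is a single left-to-right pass with an accumulator (seen flag, last survivor before the first occurrence, first survivor anywhere) instead of A's staged membership test + .index + filtered-list build + positional lookup.
import Mathlib
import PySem

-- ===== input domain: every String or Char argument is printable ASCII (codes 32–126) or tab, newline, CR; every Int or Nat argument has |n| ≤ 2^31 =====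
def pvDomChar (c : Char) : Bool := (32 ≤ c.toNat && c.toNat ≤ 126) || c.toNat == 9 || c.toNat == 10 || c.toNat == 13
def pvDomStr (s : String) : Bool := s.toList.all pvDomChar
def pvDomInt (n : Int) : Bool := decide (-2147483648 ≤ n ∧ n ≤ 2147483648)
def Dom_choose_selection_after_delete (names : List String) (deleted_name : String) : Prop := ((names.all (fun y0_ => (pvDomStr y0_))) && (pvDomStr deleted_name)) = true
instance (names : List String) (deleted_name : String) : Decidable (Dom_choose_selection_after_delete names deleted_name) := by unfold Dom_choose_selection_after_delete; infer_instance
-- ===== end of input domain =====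

-- B replaces A's staged membership test / .index / filtered-list build with one fold carrying
-- (seen, last-survivor-before-first-occurrence, first-survivor); alternative decomposition, same cost.

-- ===== PORT A =====
def choose_selection_after_delete (names : List String) (deleted_name : String) : Option String :=
  if !(names.contains deleted_name) then
    match names with
    | [] => none
    | x :: _ => some x
  else
    match PySem.List.index? names deleted_name with
    | none => none  -- unreachable: deleted_name ∈ names here
    | some index =>
      let remaining := names.filter (fun name => name != deleted_name)
      if remaining = [] then none
      else if index > 0 then PySem.List.pyGet? remaining ((index : Int) - 1)
      else PySem.List.pyGet? remaining 0

-- ===== PORT B =====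
def csadStep (deleted_name : String) : (Bool × Option String × Option String) → String → (Bool × Option String × Option String)
  | (seen, prev, survivor), name =>
    if name == deleted_name then (true, prev, survivor)
    else
      let survivor' := if survivor.isNone then some name else survivor
      let prev' := if !seen then some name else prev
      (seen, prev', survivor')

def choose_selection_after_delete_alt (names : List String) (deleted_name : String) : Option String :=
  let st := names.foldl (csadStep deleted_name) (false, none, none)
  if st.1 && st.2.1.isSome then st.2.1 else st.2.2

-- ===== PRECONDITION & SPEC =====
def Spec_choose_selection_after_delete (names : List String) (deleted_name : String) (out : Option String) : Prop := out = choose_selection_after_delete_alt names deleted_name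
instance (names : List String) (deleted_name : String) (out : Option String) : Decidable (Spec_choose_selection_after_delete names deleted_name out) := by unfold Spec_choose_selection_after_delete; infer_instance

-- ===== CLAIM (what is proved, stated in full; the proofs are below) =====
def Claim_equal_choose_selection_after_delete : Prop := ∀ (names : List String) (deleted_name : String), Dom_choose_selection_after_delete names deleted_name → Spec_choose_selection_after_delete names deleted_name (choose_selection_after_delete names deleted_name)

-- ===== LEMMAS AND PROOFS =====

theorem csadStep_eq (d : String) (b : Bool) (p s : Option String) (name : String) :
    csadStep d (b, p, s) name =
      if name = d then (true, p, s)
      else (b, if !b then some name else p, s.or (some name)) := by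
  cases s <;> simp [csadStep, beq_iff_eq]

theorem csad_fold_notmem (d : String) (l : List String) (h : d ∉ l) (p s : Option String) :
    l.foldl (csadStep d) (false, p, s) = (false, l.getLast?.or p, s.or l.head?) := by
  induction l generalizing p s with
  | nil => simp
  | cons x xs ih =>
    have hx : x ≠ d := fun hxd => h (hxd ▸ List.mem_cons_self)
    have hxs : d ∉ xs := fun hm => h (List.mem_cons_of_mem _ hm)
    rw [List.foldl_cons, csadStep_eq, if_neg hx]
    simp only [Bool.not_false, if_true]
    rw [ih hxs]
    have h1 : xs.getLast?.or (some x) = (x :: xs).getLast?.or p := by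
      cases xs with
      | nil => simp
      | cons y ys => simp [List.getLast?_cons]
    have h2 : (s.or (some x)).or xs.head? = s.or (x :: xs).head? := by
      rw [List.head?_cons, Option.or_assoc, Option.some_or]
    rw [h1, h2]

theorem csad_fold_seen (d : String) (l : List String) (p s : Option String) :
    l.foldl (csadStep d) (true, p, s) = (true, p, s.or ((l.filter (fun n => n != d)).head?)) := by
  induction l generalizing s with
  | nil => simp
  | cons x xs ih =>
    rw [List.foldl_cons, csadStep_eq, List.filter_cons]
    by_cases hx : x = d
    · rw [if_pos hx, ih]
      simp [hx]
    · rw [if_neg hx]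
      simp only [Bool.not_true, Bool.false_eq_true, if_false]
      rw [ih, Option.or_assoc]
      have hxd : (x != d) = true := by simp [hx]
      rw [if_pos hxd, List.head?_cons, Option.some_or]

theorem csad_main (names : List String) (d : String) :
    choose_selection_after_delete names d = choose_selection_after_delete_alt names d := by
  by_cases hmem : d ∈ names
  · -- decompose at the first occurrence of d
    have hsome : (PySem.List.index? names d).isSome := (PySem.List.index?_isSome_iff _ _).2 hmem
    obtain ⟨k, hk⟩ := Option.isSome_iff_exists.1 hsome
    obtain ⟨pre, suf, hdec, hlen, hpre⟩ := (PySem.List.index?_eq_some_iff _ _ _).1 hk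
    subst hdec
    have hcon : (pre ++ d :: suf).contains d = true := by
      simp [List.contains_eq_mem]
    have hfilter : (pre ++ d :: suf).filter (fun n => n != d)
        = pre ++ suf.filter (fun n => n != d) := by
      rw [List.filter_append, List.filter_cons]
      simp only [bne_self_eq_false, Bool.false_eq_true, if_false]
      congr 1
      refine List.filter_eq_self.2 (fun a ha => ?_)
      simp only [bne_iff_ne, ne_eq]
      exact fun h => hpre (h ▸ ha)
    have hB : choose_selection_after_delete_alt (pre ++ d :: suf) d
        = (if pre.getLast?.isSome then pre.getLast?
           else pre.head?.or ((suf.filter (fun n => n != d)).head?)) := by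
      unfold choose_selection_after_delete_alt
      rw [List.foldl_append, csad_fold_notmem d pre hpre, List.foldl_cons, csadStep_eq,
        if_pos rfl, csad_fold_seen]
      simp only [Option.or_none, Option.none_or, Bool.true_and]
    unfold choose_selection_after_delete
    rw [hcon, hk, hB, hfilter]
    simp only [Bool.not_true, Bool.false_eq_true, if_false]
    cases pre with
    | nil =>
      simp only [List.nil_append, ← hlen, List.length_nil, gt_iff_lt, lt_self_iff_false,
        if_false, List.getLast?_nil, Option.isSome_none, Bool.false_eq_true, List.head?_nil,
        Option.none_or]
      by_cases hrem : suf.filter (fun n => n != d) = []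
      · simp [hrem]
      · rw [if_neg hrem, PySem.List.pyGet?_zero, ← List.head?_eq_getElem?]
    | cons q qs =>
      have hrm : ¬ ((q :: qs) ++ suf.filter (fun n => n != d) = []) := by simp
      rw [if_neg hrm, ← hlen]
      have hpos : (q :: qs).length > 0 := by simp
      rw [if_pos hpos]
      have hlast : (q :: qs).getLast?.isSome := by
        rw [List.getLast?_isSome]; simp
      rw [if_pos hlast]
      have hnn : (0 : Int) ≤ ((q :: qs).length : Int) - 1 := by
        simp only [List.length_cons]; omega
      rw [PySem.List.pyGet?_of_nonneg _ hnn]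
      have htn : (((q :: qs).length : Int) - 1).toNat = (q :: qs).length - 1 := by
        simp [List.length_cons]
      rw [htn, List.getElem?_append_left (by simp only [List.length_cons]; omega),
        ← List.getLast?_eq_getElem?]
  · have hcon : names.contains d = false := by
      simp [List.contains_eq_mem, hmem]
    unfold choose_selection_after_delete choose_selection_after_delete_alt
    rw [hcon, csad_fold_notmem d names hmem]
    simp only [Bool.not_false, if_true, Option.or_none, Option.none_or]
    cases names <;> simp

-- ===== VERDICT (by name: the statement is the Claim_ definition above) =====
theorem choose_selection_after_delete_spec : Claim_equal_choose_selection_after_delete := by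
  intro names d _
  unfold Spec_choose_selection_after_delete
  exact csad_main names d
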